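-- pv_equiv track=rewrite | github.com/Valedulu/Uni-Work | Python/Assignment1/plates.py | has_valid_number_placement
-- ===== SOURCE A (Python) =====
-- def has_valid_number_placement(s):
--     found_number = False
--
--     for char in s:
--         if char.isdigit():
--
--             if not found_number and char == '0':
--                 return False
--             found_number = True
--         elif found_number:
--
--             return False
--
--     return True
-- ===== SOURCE B (Python) =====
-- def has_valid_number_placement(s):
--     i = 0
--     while i < len(s) and not s[i].isdigit():
--         i += 1
--     if i == len(s):
--         return True
--     return s[i] != '0' and s[i:].isdigit()
-- ===== Notes on version B (the rewrite author's own statement) =====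
-- stated objective: simpler
-- what changed: Replaced A's per-character state machine (a found_number flag with early returns) by a locate-then-validate decomposition: skip the non-digit prefix, then require that the first digit is nonzero and the whole remaining suffix passes one bulk str.isdigit check.
import Mathlib
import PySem

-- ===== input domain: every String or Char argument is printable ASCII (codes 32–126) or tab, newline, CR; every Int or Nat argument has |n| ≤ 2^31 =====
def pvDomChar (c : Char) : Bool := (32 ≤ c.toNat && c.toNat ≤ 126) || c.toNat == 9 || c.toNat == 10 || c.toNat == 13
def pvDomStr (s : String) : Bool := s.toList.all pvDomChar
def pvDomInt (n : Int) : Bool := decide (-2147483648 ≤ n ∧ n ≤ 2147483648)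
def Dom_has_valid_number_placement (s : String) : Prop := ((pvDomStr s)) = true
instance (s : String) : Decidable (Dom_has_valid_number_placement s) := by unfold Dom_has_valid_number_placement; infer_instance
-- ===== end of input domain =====

-- B replaces A's per-character state machine by a locate-then-validate decomposition: simpler.

-- ===== PORT A =====
-- the for-loop with the found_number flag and early returns
def hvpLoopA : List Char → Bool → Bool
  | [], _ => true
  | c :: rest, found =>
    if PySem.Chars.isdigit c then
      if !found && c == '0' then false
      else hvpLoopA rest true
    else if found then false
    else hvpLoopA rest found

def has_valid_number_placement (s : String) : Bool := hvpLoopA s.toList false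

-- ===== PORT B =====
-- the while loop advancing i past the non-digit prefix; returns s[i:] (the suffix from the first digit)
def hvpSkip : List Char → List Char
  | [] => []
  | c :: rest => if !PySem.Chars.isdigit c then hvpSkip rest else c :: rest

def has_valid_number_placement_alt (s : String) : Bool :=
  match hvpSkip s.toList with
  | [] => true
  | c :: rest => c != '0' && PySem.Chars.strIsdigit (c :: rest)

-- ===== PRECONDITION & SPEC =====
def Spec_has_valid_number_placement (s : String) (out : Bool) : Prop := out = has_valid_number_placement_alt s
instance (s : String) (out : Bool) : Decidable (Spec_has_valid_number_placement s out) := by unfold Spec_has_valid_number_placement; infer_instance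

-- ===== CLAIM (what is proved, stated in full; the proofs are below) =====
def Claim_equal_has_valid_number_placement : Prop := ∀ (s : String), Dom_has_valid_number_placement s → Spec_has_valid_number_placement s (has_valid_number_placement s)

-- ===== LEMMAS AND PROOFS =====

-- once found_number is set, A's loop accepts exactly an all-digit remainder
theorem hvpLoopA_true (l : List Char) : hvpLoopA l true = l.all PySem.Chars.isdigit := by
  induction l with
  | nil => rfl
  | cons c rest ih =>
    simp only [hvpLoopA, List.all_cons]
    by_cases h : PySem.Chars.isdigit c = true <;> simp [h, ih]

theorem hvp_main (l : List Char) :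
    hvpLoopA l false = (match hvpSkip l with
      | [] => true
      | c :: rest => c != '0' && PySem.Chars.strIsdigit (c :: rest)) := by
  induction l with
  | nil => rfl
  | cons c rest ih =>
    by_cases h : PySem.Chars.isdigit c = true
    · simp only [hvpLoopA, hvpSkip, h, if_true, Bool.not_true]
      by_cases hz : c = '0'
      · simp [hz, PySem.Chars.isdigit] at h ⊢
      · simp [hz, hvpLoopA_true, PySem.Chars.strIsdigit, h]
    · simp only [Bool.not_eq_true] at h
      simp only [hvpLoopA, hvpSkip, h, Bool.not_false, if_true, Bool.false_eq_true, if_false, ih]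

-- ===== VERDICT (by name: the statement is the Claim_ definition above) =====
theorem has_valid_number_placement_spec : Claim_equal_has_valid_number_placement := by
  intro s _
  unfold Spec_has_valid_number_placement has_valid_number_placement has_valid_number_placement_alt
  exact hvp_main s.toList
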